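-- pv_equiv track=rewrite | github.com/blinduandi/AA_Lab | Lab 2/visualization.py | quick_sort_gen
-- ===== SOURCE A (Python) =====
-- def quick_sort_gen(array):
--     def _quick_sort(arr, low, high):
--         if low < high:
--             pivot = arr[high]
--             i = low - 1
--             for j in range(low, high):
--                 yield (arr.copy(), [j, high])
--                 if arr[j] <= pivot:
--                     i += 1
--                     arr[i], arr[j] = arr[j], arr[i]
--                     yield (arr.copy(), [i, j])
--             arr[i + 1], arr[high] = arr[high], arr[i + 1]
--             yield (arr.copy(), [i+1, high])
--             yield from _quick_sort(arr, low, i)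
--             yield from _quick_sort(arr, i+2, high)
--     yield from _quick_sort(array, 0, len(array) - 1)
-- ===== SOURCE B (Python) =====
-- def quick_sort_gen(array):
--     # Flat state-machine: one work stack holds both pending ranges and
--     # in-progress partitions; each loop turn performs one partition step.
--     work = [("range", 0, len(array) - 1)]
--     while work:
--         frame = work.pop()
--         if frame[0] == "range":
--             _, low, high = frame
--             if low < high:
--                 work.append(("part", low, high, low, low - 1, array[high]))
--         else:
--             _, low, high, j, i, pivot = frame
--             if j < high:
--                 yield (array.copy(), [j, high])
--                 if array[j] <= pivot:
--                     i += 1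
--                     array[i], array[j] = array[j], array[i]
--                     yield (array.copy(), [i, j])
--                 work.append(("part", low, high, j + 1, i, pivot))
--             else:
--                 array[i + 1], array[high] = array[high], array[i + 1]
--                 yield (array.copy(), [i + 1, high])
--                 work.append(("range", i + 2, high))
--                 work.append(("range", low, i))
-- ===== Notes on version B (the rewrite author's own statement) =====
-- stated objective: alternative
-- what changed: Replaced the recursive generator (recursion + an inner for-loop partition) by a single flat state-machine loop over one work stack whose frames are either pending ranges or in-progress partition states (low, high, j, i, pivot); each loop turn performs one partition step, removing recursion and the per-yield 'yield from' delegation chain.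
import Mathlib
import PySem

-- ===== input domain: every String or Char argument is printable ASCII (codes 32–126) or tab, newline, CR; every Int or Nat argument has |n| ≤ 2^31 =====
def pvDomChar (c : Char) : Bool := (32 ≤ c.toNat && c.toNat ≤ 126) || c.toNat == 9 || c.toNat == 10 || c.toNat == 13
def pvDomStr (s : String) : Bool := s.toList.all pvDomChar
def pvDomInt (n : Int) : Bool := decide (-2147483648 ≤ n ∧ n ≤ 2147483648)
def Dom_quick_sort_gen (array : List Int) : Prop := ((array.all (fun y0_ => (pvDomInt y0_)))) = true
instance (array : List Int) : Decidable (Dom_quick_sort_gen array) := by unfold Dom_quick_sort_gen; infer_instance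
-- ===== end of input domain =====

-- B replaces A's recursive generator by a single flat state-machine loop over one
-- work stack of frames (pending ranges / in-progress partition states); same
-- in-place list mutation in Python, equivalence is about the yielded sequence.


-- ===== PORT A =====
-- arr[i], arr[j] = arr[j], arr[i]  (RHS read first, then assigned left to right;
-- the indices are nonnegative and in range whenever A executes this line)
def pvSwapA (arr : List Int) (i j : Int) : List Int :=
  (arr.set i.toNat (PySem.List.pyGetD arr j 0)).set j.toNat (PySem.List.pyGetD arr i 0)

-- A's 'for j in range(low, high)' partition loop, over the explicit range list;
-- returns (yields so far, arr, i)
def pvPartA : List Int → List Int → Int → Int → Int → (List (List Int × List Int) × List Int × Int)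
  | [], arr, i, _pivot, _high => ([], arr, i)
  | j :: js, arr, i, pivot, high =>
      if PySem.List.pyGetD arr j 0 ≤ pivot then
        let arr' := pvSwapA arr (i + 1) j
        let r := pvPartA js arr' (i + 1) pivot high
        ((arr, [j, high]) :: (arr', [i + 1, j]) :: r.1, r.2)
      else
        let r := pvPartA js arr i pivot high
        ((arr, [j, high]) :: r.1, r.2)

-- _quick_sort(arr, low, high): returns (yields, final arr); the fuel is only a
-- totality guard (quick_sort_gen supplies enough for the recursion never to hit 0)
def pvSortA : Nat → List Int → Int → Int → (List (List Int × List Int) × List Int)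
  | 0, arr, _, _ => ([], arr)
  | fuel + 1, arr, low, high =>
      if low < high then
        let pivot := PySem.List.pyGetD arr high 0
        let p := pvPartA (PySem.List.pyRange low high 1) arr (low - 1) pivot high
        let i := p.2.2
        let arr2 := pvSwapA p.2.1 (i + 1) high
        let rL := pvSortA fuel arr2 low i
        let rR := pvSortA fuel rL.2 (i + 2) high
        (p.1 ++ [(arr2, [i + 1, high])] ++ rL.1 ++ rR.1, rR.2)
      else ([], arr)

def quick_sort_gen (array : List Int) : List (List Int × List Int) :=
  (pvSortA array.length array 0 ((array.length : Int) - 1)).1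

-- ===== PORT B =====
-- a work-stack frame: a pending ("range", low, high) or an in-progress
-- ("part", low, high, j, i, pivot) partition state
inductive PvFrame : Type
  | range : Int → Int → PvFrame
  | part : Int → Int → Int → Int → Int → PvFrame
deriving DecidableEq, Repr

-- B's single 'while work' loop, one frame transition per turn; the list head is
-- the stack top (Python's pop/append); the fuel is only a totality guard
-- (quick_sort_gen_alt supplies enough for it never to hit 0)
def pvStepB : Nat → List PvFrame → List Int → List (List Int × List Int)
  | 0, _, _ => []
  | _ + 1, [], _ => []
  | fuel + 1, PvFrame.range low high :: rest, arr =>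
      if low < high then
        pvStepB fuel (PvFrame.part low high low (low - 1) (PySem.List.pyGetD arr high 0) :: rest) arr
      else
        pvStepB fuel rest arr
  | fuel + 1, PvFrame.part low high j i pivot :: rest, arr =>
      if j < high then
        if PySem.List.pyGetD arr j 0 ≤ pivot then
          -- array[i+1], array[j] = array[j], array[i+1]
          let arr' := (arr.set (i + 1).toNat (PySem.List.pyGetD arr j 0)).set j.toNat (PySem.List.pyGetD arr (i + 1) 0)
          (arr, [j, high]) :: (arr', [i + 1, j]) ::
            pvStepB fuel (PvFrame.part low high (j + 1) (i + 1) pivot :: rest) arr'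
        else
          (arr, [j, high]) :: pvStepB fuel (PvFrame.part low high (j + 1) i pivot :: rest) arr
      else
        -- array[i+1], array[high] = array[high], array[i+1]
        let arr2 := (arr.set (i + 1).toNat (PySem.List.pyGetD arr high 0)).set high.toNat (PySem.List.pyGetD arr (i + 1) 0)
        (arr2, [i + 1, high]) ::
          pvStepB fuel (PvFrame.range low i :: PvFrame.range (i + 2) high :: rest) arr2

def quick_sort_gen_alt (array : List Int) : List (List Int × List Int) :=
  pvStepB (3 * (array.length * array.length) + 3) [PvFrame.range 0 ((array.length : Int) - 1)] array

-- ===== PRECONDITION & SPEC =====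
def Spec_quick_sort_gen (array : List Int) (out : List (List Int × List Int)) : Prop := out = quick_sort_gen_alt array
instance (array : List Int) (out : List (List Int × List Int)) : Decidable (Spec_quick_sort_gen array out) := by unfold Spec_quick_sort_gen; infer_instance

-- ===== CLAIM (what is proved, stated in full; the proofs are below) =====
def Claim_equal_quick_sort_gen : Prop := ∀ (array : List Int), Dom_quick_sort_gen array → Spec_quick_sort_gen array (quick_sort_gen array)

-- ===== LEMMAS AND PROOFS =====

-- well-formedness of a frame as B's loop creates them
def pvWF : PvFrame → Prop
  | PvFrame.range _ _ => True
  | PvFrame.part low high j i _ => low < high ∧ low ≤ j ∧ j ≤ high ∧ low - 1 ≤ i ∧ i ≤ j - 1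

-- fuel bound per frame and per stack
def pvF : PvFrame → Nat
  | PvFrame.range low high => 3 * (((high - low).toNat + 1) * ((high - low).toNat + 1))
  | PvFrame.part low high j _ _ => (high - j).toNat + 1 + 3 * ((high - low).toNat * (high - low).toNat) + 3

def pvFS : List PvFrame → Nat
  | [] => 0
  | f :: rest => pvF f + pvFS rest

-- denotation of a frame in terms of A's functions: the yields it will produce
-- and the array state it leaves behind
def pvDen : PvFrame → List Int → (List (List Int × List Int) × List Int)
  | PvFrame.range low high, arr => pvSortA (high - low).toNat arr low high
  | PvFrame.part low high j i pivot, arr =>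
      let p := pvPartA (PySem.List.pyRange j high 1) arr i pivot high
      let i' := p.2.2
      let arr2 := pvSwapA p.2.1 (i' + 1) high
      let rL := pvSortA (i' - low).toNat arr2 low i'
      let rR := pvSortA (high - (i' + 2)).toNat rL.2 (i' + 2) high
      (p.1 ++ (arr2, [i' + 1, high]) :: (rL.1 ++ rR.1), rR.2)

def pvDenS : List PvFrame → List Int → List (List Int × List Int)
  | [], _ => []
  | f :: rest, arr => (pvDen f arr).1 ++ pvDenS rest (pvDen f arr).2

-- partition moves i up by at most one per processed element
theorem pvPartA_i_bounds (js : List Int) (arr : List Int) (i pivot high : Int) :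
    i ≤ (pvPartA js arr i pivot high).2.2 ∧
      (pvPartA js arr i pivot high).2.2 ≤ i + js.length := by
  induction js generalizing arr i with
  | nil => simp [pvPartA]
  | cons j js ih =>
      simp only [pvPartA]
      split
      · have h := ih (pvSwapA arr (i+1) j) (i+1)
        simp only [List.length_cons]; omega
      · have h := ih arr i
        simp only [List.length_cons]; omega

-- A's recursion never exhausts any fuel ≥ (high - low).toNat, so all such fuels agree
theorem sortA_fuel_irrel (f1 : Nat) (f2 : Nat) (arr : List Int) (low high : Int)
    (h1 : (high - low).toNat ≤ f1) (h2 : (high - low).toNat ≤ f2) :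
    pvSortA f1 arr low high = pvSortA f2 arr low high := by
  induction f1 generalizing f2 arr low high with
  | zero =>
      have h : ¬ low < high := by omega
      cases f2 with
      | zero => rfl
      | succ m => simp [pvSortA, h]
  | succ n ih =>
      by_cases h : low < high
      · cases f2 with
        | zero => omega
        | succ m =>
            simp only [pvSortA, h, if_pos]
            have hb := pvPartA_i_bounds (PySem.List.pyRange low high 1) arr (low - 1)
              (PySem.List.pyGetD arr high 0) high
            have hl : (PySem.List.pyRange low high 1).length = (high - low).toNat :=
              PySem.List.length_pyRange_one low high
            rw [ih m _ low _ (by omega) (by omega),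
                ih m _ _ high (by omega) (by omega)]
      · cases f2 with
        | zero => simp [pvSortA, h]
        | succ m => simp [pvSortA, h]

-- a trivial range frame denotes nothing
theorem den_range_trivial (low high : Int) (arr : List Int) (h : ¬ low < high) :
    pvDen (PvFrame.range low high) arr = ([], arr) := by
  have : (high - low).toNat = 0 := by omega
  simp [pvDen, this, pvSortA]

-- entering a partition: a non-trivial range frame denotes the same as the
-- initial part frame B replaces it with
theorem den_range_to_part (low high : Int) (arr : List Int) (h : low < high) :
    pvDen (PvFrame.range low high) arr
      = pvDen (PvFrame.part low high low (low - 1) (PySem.List.pyGetD arr high 0)) arr := by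
  have hd : (high - low).toNat = ((high - low).toNat - 1) + 1 := by omega
  have hb := pvPartA_i_bounds (PySem.List.pyRange low high 1) arr (low - 1)
    (PySem.List.pyGetD arr high 0) high
  have hl : (PySem.List.pyRange low high 1).length = (high - low).toNat :=
    PySem.List.length_pyRange_one low high
  simp only [pvDen]
  rw [hd]
  simp only [pvSortA, h, if_pos]
  rw [sortA_fuel_irrel ((high - low).toNat - 1)
        ((pvPartA (PySem.List.pyRange low high 1) arr (low - 1)
            (PySem.List.pyGetD arr high 0) high).2.2 - low).toNat _ low _
        (by omega) (by omega),
      sortA_fuel_irrel ((high - low).toNat - 1)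
        (high - ((pvPartA (PySem.List.pyRange low high 1) arr (low - 1)
            (PySem.List.pyGetD arr high 0) high).2.2 + 2)).toNat _ _ high
        (by omega) (by omega)]
  simp

-- sum of two squares with bounded sum (fuel accounting for the final split)
theorem sq_sum_le (x y d : Nat) (hx : 1 ≤ x) (hy : 1 ≤ y) (h : x + y ≤ d + 1) :
    x * x + y * y ≤ d * d + 1 := by nlinarith

-- the main invariant: with enough fuel on a well-formed stack, B's state machine
-- produces exactly the concatenated denotations of its frames
theorem stepB_eq_denS (fuel : Nat) (stack : List PvFrame) (arr : List Int)
    (hwf : ∀ f ∈ stack, pvWF f) (hfuel : pvFS stack ≤ fuel) :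
    pvStepB fuel stack arr = pvDenS stack arr := by
  induction fuel generalizing stack arr with
  | zero =>
      cases stack with
      | nil => rfl
      | cons f rest =>
          exfalso
          have h1 : 1 ≤ pvF f := by
            cases f with
            | range l h => simp only [pvF]; nlinarith
            | part l h j i p => simp only [pvF]; omega
          simp only [pvFS] at hfuel; omega
  | succ n ih =>
      cases stack with
      | nil => rfl
      | cons f rest =>
          cases f with
          | range low high =>
              simp only [pvFS, pvF] at hfuel
              by_cases h : low < high
              · simp only [pvStepB, h, if_pos]
                have hd1 : 1 ≤ (high - low).toNat := by omega
                rw [ih _ arr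
                    (by intro g hg
                        rw [List.mem_cons] at hg
                        rcases hg with rfl | hg
                        · simp only [pvWF]; omega
                        · exact hwf g (List.mem_cons_of_mem _ hg))
                    (by simp only [pvFS, pvF]
                        have key : (high - low).toNat + 1 + 3 * ((high - low).toNat * (high - low).toNat) + 3 + 1
                            ≤ 3 * (((high - low).toNat + 1) * ((high - low).toNat + 1)) := by nlinarith
                        omega)]
                simp only [pvDenS]
                rw [den_range_to_part low high arr h]
              · simp only [pvStepB, h, if_neg, not_false_iff]
                rw [ih rest arr (fun g hg => hwf g (List.mem_cons_of_mem _ hg))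
                    (by have hb : 0 < ((high - low).toNat + 1) * ((high - low).toNat + 1) := by positivity
                        omega)]
                simp [pvDenS, den_range_trivial low high arr h]
          | part low high j i pivot =>
              have hwfp := hwf _ (List.mem_cons_self)
              obtain ⟨hlh, hlj, hjh, hli, hij⟩ := hwfp
              simp only [pvFS, pvF] at hfuel
              by_cases h : j < high
              · -- one partition step
                have hrange := PySem.List.pyRange_one_cons h
                by_cases hle : PySem.List.pyGetD arr j 0 ≤ pivot
                · simp only [pvStepB, h, if_pos, hle]
                  rw [ih _ _
                      (by intro g hg
                          rw [List.mem_cons] at hg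
                          rcases hg with rfl | hg
                          · simp only [pvWF]; omega
                          · exact hwf g (List.mem_cons_of_mem _ hg))
                      (by simp only [pvFS, pvF]; omega)]
                  simp only [pvDenS, pvDen, hrange, pvPartA, hle, if_pos]
                  simp [pvSwapA]
                · simp only [pvStepB, h, if_pos, hle, if_neg, not_false_iff]
                  rw [ih _ _
                      (by intro g hg
                          rw [List.mem_cons] at hg
                          rcases hg with rfl | hg
                          · simp only [pvWF]; omega
                          · exact hwf g (List.mem_cons_of_mem _ hg))
                      (by simp only [pvFS, pvF]; omega)]
                  simp only [pvDenS, pvDen, hrange, pvPartA, hle, if_neg, not_false_iff]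
                  simp
              · -- partition complete: final swap, then the two sub-ranges
                have hjh' : j = high := by omega
                have hrange : PySem.List.pyRange j high 1 = [] := by
                  rw [PySem.List.pyRange_one]
                  have : (high - j).toNat = 0 := by omega
                  simp [this]
                simp only [pvStepB, h, if_neg, not_false_iff]
                rw [ih _ _
                    (by intro g hg
                        rw [List.mem_cons, List.mem_cons] at hg
                        rcases hg with rfl | rfl | hg
                        · simp only [pvWF]
                        · simp only [pvWF]
                        · exact hwf g (List.mem_cons_of_mem _ hg))
                    (by simp only [pvFS, pvF]
                        have he : high - (i + 2) = high - i - 2 := by ring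
                        rw [he]
                        have hx : (i - low).toNat + 1 + ((high - i - 2).toNat + 1)
                            ≤ (high - low).toNat + 1 := by omega
                        have h2 := sq_sum_le ((i - low).toNat + 1) ((high - i - 2).toNat + 1)
                          (high - low).toNat (by omega) (by omega) hx
                        omega)]
                simp only [pvDenS, pvDen, hrange, pvPartA]
                have harith : high - (i + 2) = high - i - 2 := by ring
                simp only [pvSwapA, harith]
                simp

-- ===== VERDICT (by name: the statement is the Claim_ definition above) =====
theorem quick_sort_gen_spec : Claim_equal_quick_sort_gen := by
  intro array _
  unfold Spec_quick_sort_gen quick_sort_gen quick_sort_gen_alt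
  rw [stepB_eq_denS _ _ _
      (by intro g hg
          rw [List.mem_cons] at hg
          rcases hg with rfl | hg
          · simp only [pvWF]
          · cases hg)
      (by simp only [pvFS, pvF]
          have ht : ((((array.length : Int) - 1) - 0).toNat + 1) * ((((array.length : Int) - 1) - 0).toNat + 1)
              ≤ array.length * array.length + 1 := by
            rcases Nat.eq_zero_or_pos array.length with hz | hp
            · have h0 : (((array.length : Int) - 1) - 0).toNat = 0 := by omega
              rw [h0, hz]
            · have h1 : (((array.length : Int) - 1) - 0).toNat + 1 = array.length := by omega
              rw [h1]; omega
          omega)]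
  simp only [pvDenS, pvDen, List.append_nil]
  rw [sortA_fuel_irrel array.length (((array.length : Int) - 1) - 0).toNat array 0
        ((array.length : Int) - 1) (by omega) (by omega)]
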